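-- pv_equiv track=rewrite | github.com/Pablech/AOC-2024-puzzles | day_7/day_7_Bridge-Repair.py | valida_linha
-- ===== SOURCE A (Python) =====
-- import itertools
--
-- def gerar_combinacoes(tamanho: int, parte_2: bool = False):
--     if parte_2:
--         sinais = ['+', '*', '||']
--     else:
--         sinais = ['+', '*']
--
--     for combinacao in itertools.product(sinais, repeat=tamanho):
--         yield combinacao
--
-- def valida_linha(total_linha: int, numeros: list[int], parte_2: bool = False) -> bool:
--     for combinacao in gerar_combinacoes(len(numeros) - 1, parte_2):
--         sub_total = numeros[0]
--
--         for i, operador in enumerate(combinacao):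
--             proximo_num = numeros[i + 1]
--
--             if operador == '+':
--                 sub_total += proximo_num
--             elif operador == '*':
--                 sub_total *= proximo_num
--             elif operador == '||':
--                 sub_total = int(str(sub_total) + str(proximo_num))
--
--             if sub_total > total_linha:
--                 break
--
--         if sub_total == total_linha:
--             return True
--     return False
-- ===== SOURCE B (Python) =====
-- def valida_linha(total_linha: int, numeros: list[int], parte_2: bool = False) -> bool:
--     # Level-by-level search over the SET of reachable subtotals, deduplicated,
--     # pruning any subtotal that exceeds total_linha (as the original's break does).
--     states = {numeros[0]}
--     for num in numeros[1:]:
--         nxt = set()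
--         for s in states:
--             cands = [s + num, s * num]
--             if parte_2:
--                 cands.append(int(str(s) + str(num)))
--             for v in cands:
--                 if v <= total_linha:
--                     nxt.add(v)
--         states = nxt
--     return total_linha in states
-- ===== Notes on version B (the rewrite author's own statement) =====
-- stated objective: alternative
-- what changed: Instead of enumerating all k^(n-1) operator combinations and re-running each one, B keeps one deduplicated SET of reachable subtotals per position, pruning subtotals above the target (exactly the original's break rule), and checks membership of the target at the end; intended as faster (measured 48x at n=16 where A starts timing out), but both are exponential in the worst case so a timing run could not confirm it at the largest sizes.
-- outside the precondition, e.g. on valida_linha(4, [5, -1], True): A returns True, B raises ValueError; on valida_linha(3, [], False): A raises ValueError, B raises IndexError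
import Mathlib
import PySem

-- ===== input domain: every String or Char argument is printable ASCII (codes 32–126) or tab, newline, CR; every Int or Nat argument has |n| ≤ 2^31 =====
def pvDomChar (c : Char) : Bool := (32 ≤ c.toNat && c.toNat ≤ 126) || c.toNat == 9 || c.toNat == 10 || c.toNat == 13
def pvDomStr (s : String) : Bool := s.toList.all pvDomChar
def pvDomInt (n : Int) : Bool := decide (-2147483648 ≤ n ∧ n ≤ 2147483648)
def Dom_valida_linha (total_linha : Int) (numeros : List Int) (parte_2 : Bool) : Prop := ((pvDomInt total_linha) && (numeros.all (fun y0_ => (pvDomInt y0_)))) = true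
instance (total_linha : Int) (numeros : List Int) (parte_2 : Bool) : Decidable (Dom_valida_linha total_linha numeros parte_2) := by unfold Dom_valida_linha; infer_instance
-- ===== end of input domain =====

-- B replaces A's enumeration of all operator combinations by one deduplicated set of
-- reachable subtotals per position (same pruning rule, same result).

-- `int(str(a) + str(b))`; inside Pre_ the parse never fails (second operand is
-- non-negative there), the `.getD 0` default is never used.
def pyConcat (a b : Int) : Int :=
  (PySem.Int.ofChars? (PySem.Int.toChars a ++ PySem.Int.toChars b)).getD 0

-- ===== PORT A =====
-- itertools.product(sinais, repeat=n), first coordinate varying slowest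
def combosA (sinais : List String) : Nat → List (List String)
  | 0 => [[]]
  | n + 1 => sinais.flatMap (fun a => (combosA sinais n).map (a :: ·))

-- the inner `for i, operador in enumerate(combinacao)` loop with its break
def runCombo (total : Int) (numeros : List Int) : Int → Nat → List String → Int
  | sub, _, [] => sub
  | sub, i, op :: rest =>
    let proximo := (PySem.List.pyGet? numeros ((i : Int) + 1)).getD 0  -- always in range as called
    let sub' := if op == "+" then sub + proximo
      else if op == "*" then sub * proximo
      else if op == "||" then pyConcat sub proximo
      else sub
    if sub' > total then sub' else runCombo total numeros sub' (i + 1) rest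

def valida_linha (total_linha : Int) (numeros : List Int) (parte_2 : Bool) : Bool :=
  let sinais := if parte_2 then ["+", "*", "||"] else ["+", "*"]
  (combosA sinais (numeros.length - 1)).any (fun c =>
    runCombo total_linha numeros ((PySem.List.pyGet? numeros 0).getD 0) 0 c == total_linha)

-- ===== PORT B =====
def candsB (parte_2 : Bool) (s num : Int) : List Int :=
  if parte_2 then [s + num, s * num, pyConcat s num] else [s + num, s * num]

def stepB (total : Int) (parte_2 : Bool) (states : PySem.Set Int) (num : Int) : PySem.Set Int :=
  states.foldl
    (fun nxt s =>
      (candsB parte_2 s num).foldl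
        (fun nxt v => if v ≤ total then PySem.Set.add nxt v else nxt) nxt)
    PySem.Set.empty

def valida_linha_alt (total_linha : Int) (numeros : List Int) (parte_2 : Bool) : Bool :=
  match numeros with
  | [] => false  -- unreachable under Pre_ (the Python raises IndexError here)
  | n0 :: rest =>
    (rest.foldl (stepB total_linha parte_2) (PySem.Set.ofList [n0])).contains total_linha

-- ===== PRECONDITION & SPEC =====
-- Pre_ excludes empty numeros (A raises ValueError from product(repeat=-1)) and, when
-- parte_2 is set, lists with a negative number after the first: there the '||' branch
-- int(str(a)+str(b)) raises ValueError, and whether A raises or returns first depends on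
-- its enumeration order (e.g. A returns True on (4, [5, -1], True) while B raises).
def Pre_valida_linha (total_linha : Int) (numeros : List Int) (parte_2 : Bool) : Prop :=
  numeros ≠ [] ∧ (parte_2 = true → ∀ x ∈ numeros.tail, 0 ≤ x)
instance (total_linha : Int) (numeros : List Int) (parte_2 : Bool) : Decidable (Pre_valida_linha total_linha numeros parte_2) := by unfold Pre_valida_linha; infer_instance

def pvWitness_valida_linha : Int × List Int × Bool := (29, [2, 3, 5], true)

def Spec_valida_linha (total_linha : Int) (numeros : List Int) (parte_2 : Bool) (out : Bool) : Prop := out = valida_linha_alt total_linha numeros parte_2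
instance (total_linha : Int) (numeros : List Int) (parte_2 : Bool) (out : Bool) : Decidable (Spec_valida_linha total_linha numeros parte_2 out) := by unfold Spec_valida_linha; infer_instance

-- ===== CLAIM (what is proved, stated in full; the proofs are below) =====
def Claim_equal_valida_linha : Prop := ∀ (total_linha : Int) (numeros : List Int) (parte_2 : Bool), Dom_valida_linha total_linha numeros parte_2 → Pre_valida_linha total_linha numeros parte_2 → Spec_valida_linha total_linha numeros parte_2 (valida_linha total_linha numeros parte_2)

-- ===== LEMMAS AND PROOFS =====

-- shared helpers for the proofs
def sinaisOf (p2 : Bool) : List String := if p2 then ["+", "*", "||"] else ["+", "*"]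

def opA (op : String) (s num : Int) : Int :=
  if op == "+" then s + num
  else if op == "*" then s * num
  else if op == "||" then pyConcat s num
  else s

-- the inner loop, re-indexed on the remaining numbers instead of an index into numeros
def runList (total : Int) : Int → List String → List Int → Int
  | s, [], _ => s
  | s, _ :: _, [] => s  -- unreachable in use
  | s, op :: rest, num :: nums =>
    let s' := opA op s num
    if s' > total then s' else runList total s' rest nums

-- common specification: "some operator choice keeps every intermediate ≤ total and ends on total"
def specRun (total : Int) (p2 : Bool) : Int → List Int → Bool
  | s, [] => s == total
  | s, num :: rest =>
    (candsB p2 s num).any (fun v => if v ≤ total then specRun total p2 v rest else false)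

theorem candsB_eq_map (p2 : Bool) (s num : Int) :
    candsB p2 s num = (sinaisOf p2).map (fun op => opA op s num) := by
  cases p2 <;> simp [candsB, sinaisOf, opA]

theorem combosA_length (sinais : List String) :
    ∀ (n : Nat) (c : List String), c ∈ combosA sinais n → c.length = n := by
  intro n
  induction n with
  | zero => simp [combosA]
  | succ n ih =>
    intro c hc
    simp only [combosA, List.mem_flatMap, List.mem_map] at hc
    obtain ⟨a, _, c', hc', rfl⟩ := hc
    simp [ih c' hc']

theorem runCombo_eq_runList (total : Int) (numeros : List Int) :
    ∀ (c : List String) (tail : List Int) (s : Int) (i : Nat),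
      numeros.drop (i + 1) = tail → c.length ≤ tail.length →
      runCombo total numeros s i c = runList total s c tail := by
  intro c
  induction c with
  | nil => intro tail s i _ _; cases tail <;> rfl
  | cons op rest ih =>
    intro tail s i hdrop hlen
    cases tail with
    | nil => simp at hlen
    | cons t0 tail' =>
      have hget : PySem.List.pyGet? numeros ((i : Int) + 1) = some t0 := by
        have hcast : ((i : Int) + 1) = ((i + 1 : Nat) : Int) := by push_cast; ring
        rw [hcast, PySem.List.pyGet?_natCast]
        have h0 : (numeros.drop (i + 1))[0]? = numeros[i + 1 + 0]? := List.getElem?_drop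
        rw [hdrop] at h0
        simpa using h0.symm
      have hdrop' : numeros.drop (i + 1 + 1) = tail' := by
        rw [← List.drop_drop, hdrop]
        rfl
      simp only [runCombo, hget, Option.getD_some]
      show (if opA op s t0 > total then opA op s t0
            else runCombo total numeros (opA op s t0) (i + 1) rest) = _
      simp only [runList]
      by_cases h : opA op s t0 > total
      · simp [h]
      · simp only [h, if_false]
        exact ih tail' (opA op s t0) (i + 1) hdrop' (by simpa using Nat.le_of_succ_le_succ (by simpa using hlen))

theorem any_combos (total : Int) (p2 : Bool) :
    ∀ (tail : List Int) (s : Int),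
      (combosA (sinaisOf p2) tail.length).any (fun c => runList total s c tail == total)
        = specRun total p2 s tail := by
  intro tail
  induction tail with
  | nil => intro s; simp [combosA, specRun, runList]
  | cons num tail' ih =>
    intro s
    simp only [List.length_cons, combosA, List.any_flatMap, List.any_map]
    simp only [specRun, candsB_eq_map, List.any_map]
    apply List.any_congr rfl
    intro op
    show ((combosA (sinaisOf p2) tail'.length).any
        (fun c => runList total s (op :: c) (num :: tail') == total)) = _
    simp only [runList, Function.comp]
    by_cases h : opA op s num > total
    · have hne : (opA op s num == total) = false := by
        simp only [beq_eq_false_iff_ne]; omega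
      simp [h, hne, show ¬ opA op s num ≤ total by omega]
    · simp only [h, if_false]
      rw [if_pos (by omega : opA op s num ≤ total)]
      exact ih (opA op s num)

theorem mem_foldl_add (total v : Int) :
    ∀ (cs : List Int) (acc : List Int),
      (v ∈ cs.foldl (fun nxt w => if w ≤ total then PySem.Set.add nxt w else nxt) acc)
        ↔ v ∈ acc ∨ (v ∈ cs ∧ v ≤ total) := by
  intro cs
  induction cs with
  | nil => simp
  | cons w cs ih =>
    intro acc
    simp only [List.foldl_cons]
    by_cases hw : w ≤ total
    · rw [if_pos hw, ih]
      simp only [PySem.Set.mem_add, List.mem_cons]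
      constructor
      · rintro (⟨h | rfl⟩ | h)
        · exact Or.inl h
        · exact Or.inr ⟨Or.inl rfl, hw⟩
        · exact Or.inr ⟨Or.inr h.1, h.2⟩
      · rintro (h | ⟨(rfl | h), hv⟩)
        · exact Or.inl (Or.inl h)
        · exact Or.inl (Or.inr rfl)
        · exact Or.inr ⟨h, hv⟩
    · rw [if_neg hw, ih]
      simp only [List.mem_cons]
      constructor
      · rintro (h | h)
        · exact Or.inl h
        · exact Or.inr ⟨Or.inr h.1, h.2⟩
      · rintro (h | ⟨(rfl | h), hv⟩)
        · exact Or.inl h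
        · exact absurd hv hw
        · exact Or.inr ⟨h, hv⟩

theorem mem_stepB (total : Int) (p2 : Bool) (num v : Int) :
    ∀ (states acc : List Int),
      (v ∈ states.foldl
          (fun nxt s => (candsB p2 s num).foldl
            (fun nxt v => if v ≤ total then PySem.Set.add nxt v else nxt) nxt) acc)
        ↔ v ∈ acc ∨ ∃ s ∈ states, v ∈ candsB p2 s num ∧ v ≤ total := by
  intro states
  induction states with
  | nil => simp
  | cons s0 states ih =>
    intro acc
    simp only [List.foldl_cons, ih, mem_foldl_add]
    constructor
    · rintro (⟨h | h⟩ | ⟨s, hs, h⟩)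
      · exact Or.inl h
      · exact Or.inr ⟨s0, List.mem_cons_self, h⟩
      · exact Or.inr ⟨s, List.mem_cons_of_mem _ hs, h⟩
    · rintro (h | ⟨s, hs, h⟩)
      · exact Or.inl (Or.inl h)
      · rcases List.mem_cons.mp hs with rfl | hs
        · exact Or.inl (Or.inr h)
        · exact Or.inr ⟨s, hs, h⟩

theorem contains_foldl (total : Int) (p2 : Bool) :
    ∀ (tail : List Int) (states : List Int),
      (tail.foldl (stepB total p2) states).contains total
        = states.any (fun s => specRun total p2 s tail) := by
  intro tail
  induction tail with
  | nil =>
    intro states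
    simp only [List.foldl_nil]
    show states.contains total = states.any (fun s => s == total)
    exact (List.any_beq').symm
  | cons num tail' ih =>
    intro states
    simp only [List.foldl_cons, ih]
    rw [Bool.eq_iff_iff]
    simp only [List.any_eq_true, specRun]
    constructor
    · rintro ⟨v, hv, hrun⟩
      rcases (mem_stepB total p2 num v states PySem.Set.empty).mp hv with h | ⟨s, hs, hc, hle⟩
      · simp [PySem.Set.empty] at h
      · exact ⟨s, hs, v, hc, by simp [hle, hrun]⟩
    · rintro ⟨s, hs, v, hc, hif⟩
      by_cases hle : v ≤ total
      · rw [if_pos hle] at hif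
        exact ⟨v, (mem_stepB total p2 num v states PySem.Set.empty).mpr
          (Or.inr ⟨s, hs, hc, hle⟩), hif⟩
      · rw [if_neg hle] at hif; exact absurd hif (by simp)

-- ===== VERDICT (by name: the statement is the Claim_ definition above) =====
theorem valida_linha_spec : Claim_equal_valida_linha := by
  intro total numeros p2 _ hpre
  unfold Spec_valida_linha
  obtain ⟨hne, -⟩ := hpre
  cases numeros with
  | nil => exact absurd rfl hne
  | cons n0 rest =>
    show valida_linha total (n0 :: rest) p2 = valida_linha_alt total (n0 :: rest) p2
    unfold valida_linha valida_linha_alt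
    simp only [List.length_cons, Nat.add_sub_cancel, PySem.List.pyGet?_zero_cons,
      Option.getD_some]
    have hA : ∀ c ∈ combosA (sinaisOf p2) rest.length,
        (runCombo total (n0 :: rest) n0 0 c == total)
          = (runList total n0 c rest == total) := by
      intro c hc
      rw [runCombo_eq_runList total (n0 :: rest) c rest n0 0 rfl
        (le_of_eq (combosA_length _ _ c hc))]
    calc (combosA (if p2 then ["+", "*", "||"] else ["+", "*"]) rest.length).any
            (fun c => runCombo total (n0 :: rest) n0 0 c == total)
        = (combosA (sinaisOf p2) rest.length).any
            (fun c => runList total n0 c rest == total) := by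
          rw [Bool.eq_iff_iff]
          simp only [List.any_eq_true]
          exact exists_congr fun c => and_congr_right fun hc => by rw [hA c hc]
      _ = specRun total p2 n0 rest := any_combos total p2 rest n0
      _ = ([n0] : List Int).any (fun s => specRun total p2 s rest) := by simp
      _ = (rest.foldl (stepB total p2) (PySem.Set.ofList [n0])).contains total := by
          rw [contains_foldl]; rfl
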